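-- pv_equiv track=rewrite | github.com/Gattsu1337/Python-Fundamentals | character_multiplier.py | sum_funct
-- ===== SOURCE A (Python) =====
-- def sum_funct(longer_word, shorter_word):
--     total_sum = 0
--     for i in range(len(longer_word)):
--         if i < len(shorter_word):
--             total_sum += ord(longer_word[i]) * ord(shorter_word[i])
--         else:
--             total_sum += ord(longer_word[i])
--
--     return total_sum
-- ===== SOURCE B (Python) =====
-- def sum_funct(longer_word, shorter_word):
--     # Arithmetic reformulation: every char of longer_word contributes ord(c)
--     # unconditionally; a char paired with s contributes ord(c)*ord(s) instead,
--     # i.e. ord(c) plus a correction of ord(c)*(ord(s)-1).  So: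
--     #   result = sum(ord over longer_word) + sum(ord(a)*(ord(b)-1) over overlap)
--     base = sum(map(ord, longer_word))
--     correction = sum(ord(a) * (ord(b) - 1) for a, b in zip(longer_word, shorter_word))
--     return base + correction
-- ===== Notes on version B (the rewrite author's own statement) =====
-- stated objective: alternative
-- what changed: Replaced the per-index branched accumulation by an arithmetic reformulation: an unconditional ord-sum over all of longer_word plus a correction term ord(a)*(ord(b)-1) summed over the zipped overlap, using ord(a)*ord(b) = ord(a) + ord(a)*(ord(b)-1); no conditional and no tail slice remain.
import Mathlib
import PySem

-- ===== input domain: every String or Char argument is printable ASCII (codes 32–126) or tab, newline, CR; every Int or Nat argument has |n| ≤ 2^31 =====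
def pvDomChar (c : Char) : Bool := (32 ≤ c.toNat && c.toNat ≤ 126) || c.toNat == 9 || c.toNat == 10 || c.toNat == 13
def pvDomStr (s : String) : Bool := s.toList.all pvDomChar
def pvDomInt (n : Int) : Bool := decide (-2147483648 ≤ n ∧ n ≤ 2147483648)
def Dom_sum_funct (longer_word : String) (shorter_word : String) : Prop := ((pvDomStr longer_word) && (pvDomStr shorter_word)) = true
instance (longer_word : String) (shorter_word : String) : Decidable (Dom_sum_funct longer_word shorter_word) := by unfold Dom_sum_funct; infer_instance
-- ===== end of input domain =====

-- B replaces A's branched index loop by an arithmetic reformulation: an unconditional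
-- ord-sum over all of longer_word plus a correction ord(a)*(ord(b)-1) over the overlap.

-- ===== PORT A =====
-- A: one loop over all indices of longer_word, branching per index on i < len(shorter_word).
-- Indexing is always in range (0 ≤ i < len), so pyGetD with a default is exact here.
def sum_funct (longer_word : String) (shorter_word : String) : Int :=
  let l := longer_word.toList
  let s := shorter_word.toList
  (PySem.List.pyRange 0 (l.length : Int) 1).foldl
    (fun total_sum i =>
      if i < (s.length : Int) then
        total_sum + ((PySem.List.pyGetD l i ' ').toNat : Int) * ((PySem.List.pyGetD s i ' ').toNat : Int)
      else
        total_sum + ((PySem.List.pyGetD l i ' ').toNat : Int)) 0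

-- ===== PORT B =====
-- B: base ord-sum over longer_word plus the zip correction term; no branch, no slice.
def sum_funct_alt (longer_word : String) (shorter_word : String) : Int :=
  let l := longer_word.toList
  let s := shorter_word.toList
  let base := (l.map (fun c => (c.toNat : Int))).sum
  let correction := ((l.zip s).map (fun p => (p.1.toNat : Int) * ((p.2.toNat : Int) - 1))).sum
  base + correction

-- ===== PRECONDITION & SPEC =====
def Spec_sum_funct (longer_word : String) (shorter_word : String) (out : Int) : Prop := out = sum_funct_alt longer_word shorter_word
instance (longer_word : String) (shorter_word : String) (out : Int) : Decidable (Spec_sum_funct longer_word shorter_word out) := by unfold Spec_sum_funct; infer_instance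

-- ===== CLAIM (what is proved, stated in full; the proofs are below) =====
def Claim_equal_sum_funct : Prop := ∀ (longer_word : String) (shorter_word : String), Dom_sum_funct longer_word shorter_word → Spec_sum_funct longer_word shorter_word (sum_funct longer_word shorter_word)

-- ===== LEMMAS AND PROOFS =====

-- a branched additive fold is the sum of the branched per-element contributions
lemma pv_foldl_add_sum {ι : Type} (c : ι → Prop) [DecidablePred c] (p q : ι → Int)
    (xs : List ι) (a : Int) :
    xs.foldl (fun acc i => if c i then acc + p i else acc + q i) a
      = a + (xs.map (fun i => if c i then p i else q i)).sum := by
  induction xs generalizing a with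
  | nil => simp
  | cons x xs ih =>
    by_cases hx : c x <;> simp [List.foldl_cons, hx, ih, add_assoc]

-- mapping f ∘ getD over the index range is mapping f over the list
lemma pv_map_range_getD {α β : Type} (xs : List α) (f : α → β) (d : α) :
    (List.range xs.length).map (fun k => f (xs.getD k d)) = xs.map f := by
  induction xs with
  | nil => simp
  | cons x xs ih =>
    simp [List.range_succ_eq_map, List.map_map]
    exact ih

-- A's branched indexed sum as two segment sums
lemma pv_main (l s : List Char) :
    (PySem.List.pyRange 0 (l.length : Int) 1).foldl
      (fun total_sum i =>
        if i < (s.length : Int) then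
          total_sum + ((PySem.List.pyGetD l i ' ').toNat : Int) * ((PySem.List.pyGetD s i ' ').toNat : Int)
        else
          total_sum + ((PySem.List.pyGetD l i ' ').toNat : Int)) 0
    = ((l.zip s).map (fun p => ((p.1.toNat : Int) * (p.2.toNat : Int)))).sum
      + ((l.drop s.length).map (fun c => (c.toNat : Int))).sum := by
  rw [PySem.List.pyRange_one, List.foldl_map]
  simp only [zero_add, sub_zero, Int.toNat_natCast, Nat.cast_lt, PySem.List.pyGetD_natCast]
  rw [pv_foldl_add_sum, zero_add]
  have hk : l.length = min l.length s.length + (l.length - min l.length s.length) :=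
    (Nat.add_sub_cancel' (Nat.min_le_left _ _)).symm
  rw [hk, List.range_add, List.map_append, List.sum_append]
  congr 1
  · rw [← pv_map_range_getD (l.zip s) (fun p => ((p.1.toNat : Int) * (p.2.toNat : Int))) (' ', ' ')]
    rw [List.length_zip]
    apply congrArg
    apply List.map_congr_left
    intro k hk'
    simp only [List.mem_range] at hk'
    have hkl : k < l.length := lt_of_lt_of_le hk' (Nat.min_le_left _ _)
    have hks : k < s.length := lt_of_lt_of_le hk' (Nat.min_le_right _ _)
    have hz : k < (l.zip s).length := by simp [List.length_zip]; omega
    rw [if_pos hks, List.getD_eq_getElem _ _ hz, List.getElem_zip,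
        List.getD_eq_getElem _ _ hkl, List.getD_eq_getElem _ _ hks]
  · rcases Nat.le_total s.length l.length with hle | hle
    · rw [Nat.min_eq_right hle]
      rw [← pv_map_range_getD (l.drop s.length) (fun c => (c.toNat : Int)) ' ']
      rw [List.length_drop, List.map_map]
      apply congrArg
      apply List.map_congr_left
      intro x hx
      simp only [List.mem_range] at hx
      simp only [Function.comp_apply]
      have hxl : s.length + x < l.length := by omega
      have hxd : x < (l.drop s.length).length := by simp [List.length_drop]; omega
      rw [if_neg (by omega), List.getD_eq_getElem _ _ hxd, List.getElem_drop,
          List.getD_eq_getElem _ _ hxl]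
    · have h0 : l.length - min l.length s.length = 0 := by omega
      have hd : l.drop s.length = [] := List.drop_eq_nil_of_le hle
      rw [h0, hd]
      simp

-- B's base-plus-correction form equals the two segment sums
lemma pv_alt (l s : List Char) :
    (l.map (fun c => (c.toNat : Int))).sum
      + ((l.zip s).map (fun p => (p.1.toNat : Int) * ((p.2.toNat : Int) - 1))).sum
    = ((l.zip s).map (fun p => ((p.1.toNat : Int) * (p.2.toNat : Int)))).sum
      + ((l.drop s.length).map (fun c => (c.toNat : Int))).sum := by
  induction l generalizing s with
  | nil => simp
  | cons x xs ih =>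
    cases s with
    | nil => simp
    | cons y ys =>
      simp only [List.zip_cons_cons, List.map_cons, List.sum_cons, List.length_cons, List.drop_succ_cons]
      linear_combination ih ys

-- ===== VERDICT (by name: the statement is the Claim_ definition above) =====
theorem sum_funct_spec : Claim_equal_sum_funct := by
  intro lw sw _
  unfold Spec_sum_funct sum_funct sum_funct_alt
  simp only []
  rw [pv_main lw.toList sw.toList, ← pv_alt lw.toList sw.toList]
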